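-- pv_equiv track=rewrite | github.com/avik94ab/corex-speedup | main.py | state_generator
-- ===== SOURCE A (Python) =====
-- from itertools import product
--
-- def state_generator(partitionSchemes):
--     partitionStates = {}
--     for partitionId, partition in partitionSchemes.items():
--         tmp = []
--         for item in product([0,1], repeat=len(partition)):
--             if sum(item)!=0 and sum(item)<len(partition):
--                 tmp.append(list(item))
--         partitionStates[partitionId] = tmp
--     return partitionStates
-- ===== SOURCE B (Python) =====
-- def state_generator(partitionSchemes):
--     partitionStates = {}
--     for partitionId, partition in partitionSchemes.items():
--         n = len(partition)
--         states = []
--         for code in range(1, 2**n - 1):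
--             bits = []
--             for _ in range(n):
--                 code, b = divmod(code, 2)
--                 bits.append(b)
--             bits.reverse()
--             states.append(bits)
--         partitionStates[partitionId] = states
--     return partitionStates
-- ===== Notes on version B (the rewrite author's own statement) =====
-- stated objective: alternative
-- what changed: Instead of materialising every 0/1 tuple via itertools.product and filtering out the all-zero and all-one vectors by summing each candidate, B counts through the integers 1 .. 2**n-2 (which excludes those two endpoints for free) and decodes each integer into its n-bit big-endian list by repeated divmod, building each state back-to-front.
import Mathlib
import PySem

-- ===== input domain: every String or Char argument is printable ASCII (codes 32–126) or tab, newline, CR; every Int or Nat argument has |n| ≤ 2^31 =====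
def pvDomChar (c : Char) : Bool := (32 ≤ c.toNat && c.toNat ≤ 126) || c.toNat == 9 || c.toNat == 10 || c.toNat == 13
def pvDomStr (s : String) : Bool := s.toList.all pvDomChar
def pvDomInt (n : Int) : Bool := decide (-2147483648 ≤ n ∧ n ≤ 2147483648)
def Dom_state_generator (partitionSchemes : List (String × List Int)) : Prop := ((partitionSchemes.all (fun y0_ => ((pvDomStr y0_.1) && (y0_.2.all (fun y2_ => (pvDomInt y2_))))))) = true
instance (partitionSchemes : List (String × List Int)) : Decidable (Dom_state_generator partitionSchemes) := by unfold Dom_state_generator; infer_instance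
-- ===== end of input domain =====

-- B replaces product-and-filter by counting 1 .. 2^n-2 and decoding each integer into its
-- n-bit big-endian state, so the all-0/all-1 candidates are never generated (alternative algorithm).


-- ===== PORT A =====
-- itertools.product([0,1], repeat=n): lexicographic, first coordinate varies slowest
def pvProd01 : Nat → List (List Int)
  | 0 => [[]]
  | n + 1 => [(0 : Int), 1].flatMap (fun b => (pvProd01 n).map (fun t => b :: t))

def state_generator (partitionSchemes : List (String × List Int)) : List (String × List (List Int)) :=
  ((PySem.Dict.ofList partitionSchemes).items.foldl
    (fun (acc : PySem.Dict String (List (List Int))) p =>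
      let tmp := (pvProd01 p.2.length).filter
        (fun item => decide (item.sum ≠ 0 ∧ item.sum < (p.2.length : Int)))
      acc.insert p.1 tmp)
    PySem.Dict.empty).items

-- ===== PORT B =====
def state_generator_alt (partitionSchemes : List (String × List Int)) : List (String × List (List Int)) :=
  ((PySem.Dict.ofList partitionSchemes).items.foldl
    (fun (acc : PySem.Dict String (List (List Int))) p =>
      let n := p.2.length
      let states := (PySem.List.pyRange 1 ((2 : Int) ^ n - 1) 1).map (fun code =>
        let fin := (List.range n).foldl
          (fun (s : Int × List Int) _ =>
            (PySem.Int.floordiv s.1 2, s.2 ++ [PySem.Int.mod s.1 2]))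
          (code, [])
        fin.2.reverse)
      acc.insert p.1 states)
    PySem.Dict.empty).items

-- ===== PRECONDITION & SPEC =====
def Spec_state_generator (partitionSchemes : List (String × List Int)) (out : List (String × List (List Int))) : Prop := out = state_generator_alt partitionSchemes
instance (partitionSchemes : List (String × List Int)) (out : List (String × List (List Int))) : Decidable (Spec_state_generator partitionSchemes out) := by unfold Spec_state_generator; infer_instance

-- ===== CLAIM (what is proved, stated in full; the proofs are below) =====
def Claim_equal_state_generator : Prop := ∀ (partitionSchemes : List (String × List Int)), Dom_state_generator partitionSchemes → Spec_state_generator partitionSchemes (state_generator partitionSchemes)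

-- ===== LEMMAS AND PROOFS =====

-- big-endian bits of k (valid for k < 2^n)
def pvBitsBE : Nat → Nat → List Int
  | 0, _ => []
  | n + 1, k => ((k / 2 ^ n : Nat) : Int) :: pvBitsBE n (k % 2 ^ n)

-- little-endian bits, the order B's divmod loop produces
def pvBitsLE : Nat → Int → List Int
  | 0, _ => []
  | n + 1, i => PySem.Int.mod i 2 :: pvBitsLE n (PySem.Int.floordiv i 2)

lemma pvProd01_eq (n : Nat) :
    pvProd01 n = (List.range (2 ^ n)).map (pvBitsBE n) := by
  induction n with
  | zero => rfl
  | succ n ih =>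
      have h2 : (2:Nat) ^ (n + 1) = 2 ^ n + 2 ^ n := by ring
      have hflat : pvProd01 (n + 1) =
          (pvProd01 n).map (fun t => (0 : Int) :: t) ++ (pvProd01 n).map (fun t => (1 : Int) :: t) := by
        simp [pvProd01]
      rw [hflat, h2, List.range_add, List.map_append, List.map_map, ih, List.map_map, List.map_map]
      congr 1
      · apply List.map_congr_left
        intro k hk
        have hk' : k < 2 ^ n := List.mem_range.mp hk
        show (0 : Int) :: pvBitsBE n k = pvBitsBE (n + 1) k
        simp [pvBitsBE, Nat.div_eq_of_lt hk', Nat.mod_eq_of_lt hk']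
      · apply List.map_congr_left
        intro k hk
        have hk' : k < 2 ^ n := List.mem_range.mp hk
        show (1 : Int) :: pvBitsBE n k = pvBitsBE (n + 1) (2 ^ n + k)
        have hd : (2 ^ n + k) / 2 ^ n = 1 := by
          rw [Nat.add_comm, Nat.add_div_right _ (Nat.two_pow_pos n), Nat.div_eq_of_lt hk']
        have hm : (2 ^ n + k) % 2 ^ n = k := by
          rw [Nat.add_comm, Nat.add_mod_right, Nat.mod_eq_of_lt hk']
        simp [pvBitsBE, hd, hm]

lemma pvBitsBE_snoc (n : Nat) : ∀ k : Nat, k < 2 ^ (n + 1) →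
    pvBitsBE (n + 1) k = pvBitsBE n (k / 2) ++ [((k % 2 : Nat) : Int)] := by
  induction n with
  | zero =>
      intro k hk
      have hk1 : k < 2 := by simpa using hk
      simp [pvBitsBE, Nat.mod_eq_of_lt hk1]
  | succ n ih =>
      intro k hk
      have h1 : k % 2 ^ (n + 1) < 2 ^ (n + 1) := Nat.mod_lt _ (Nat.two_pow_pos _)
      have e1 : k / 2 / 2 ^ n = k / 2 ^ (n + 1) := by
        rw [Nat.div_div_eq_div_mul, pow_succ, mul_comm]
      have e2 : k % 2 ^ (n + 1) % 2 = k % 2 :=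
        Nat.mod_mod_of_dvd _ (dvd_pow_self 2 (Nat.succ_ne_zero n))
      have e3 : k % 2 ^ (n + 1) / 2 = k / 2 % 2 ^ n := by
        have h := Nat.mod_mul_right_div_self k 2 (2 ^ n)
        rwa [← pow_succ'] at h
      calc pvBitsBE (n + 2) k
          = ((k / 2 ^ (n + 1) : Nat) : Int) :: pvBitsBE (n + 1) (k % 2 ^ (n + 1)) := rfl
        _ = ((k / 2 ^ (n + 1) : Nat) : Int) ::
              (pvBitsBE n (k % 2 ^ (n + 1) / 2) ++ [((k % 2 ^ (n + 1) % 2 : Nat) : Int)]) := by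
              rw [ih _ h1]
        _ = pvBitsBE (n + 1) (k / 2) ++ [((k % 2 : Nat) : Int)] := by
              rw [e2, e3]
              show _ = (((k / 2 / 2 ^ n : Nat) : Int) :: pvBitsBE n (k / 2 % 2 ^ n)) ++ _
              rw [e1]
              simp

lemma pvBitsLE_eq (n : Nat) : ∀ k : Nat, k < 2 ^ n →
    pvBitsLE n (k : Int) = (pvBitsBE n k).reverse := by
  induction n with
  | zero => intro k hk; rfl
  | succ n ih =>
      intro k hk
      have hk2 : k / 2 < 2 ^ n := by
        rw [Nat.div_lt_iff_lt_mul (by norm_num : (0:Nat) < 2)]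
        calc k < 2 ^ (n + 1) := hk
          _ = 2 ^ n * 2 := pow_succ 2 n
      have hm : PySem.Int.mod (k : Int) 2 = ((k % 2 : Nat) : Int) := by
        rw [PySem.Int.mod_eq_emod_of_pos (by norm_num)]; omega
      have hd : PySem.Int.floordiv (k : Int) 2 = ((k / 2 : Nat) : Int) := by
        rw [PySem.Int.floordiv_eq_ediv_of_pos (by norm_num)]; omega
      calc pvBitsLE (n + 1) (k : Int)
          = PySem.Int.mod (k : Int) 2 :: pvBitsLE n (PySem.Int.floordiv (k : Int) 2) := rfl
        _ = ((k % 2 : Nat) : Int) :: pvBitsLE n ((k / 2 : Nat) : Int) := by rw [hm, hd]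
        _ = ((k % 2 : Nat) : Int) :: (pvBitsBE n (k / 2)).reverse := by rw [ih _ hk2]
        _ = (pvBitsBE (n + 1) k).reverse := by
              rw [pvBitsBE_snoc n k hk]
              simp

lemma pvSum_bitsBE (n : Nat) : ∀ k : Nat, k < 2 ^ n →
    ((pvBitsBE n k).sum = 0 ↔ k = 0) ∧ ((pvBitsBE n k).sum < (n : Int) ↔ k < 2 ^ n - 1) ∧
      0 ≤ (pvBitsBE n k).sum ∧ (pvBitsBE n k).sum ≤ (n : Int) := by
  induction n with
  | zero =>
      intro k hk
      have hk0 : k = 0 := by omega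
      subst hk0
      simp [pvBitsBE]
  | succ n ih =>
      intro k hk
      have hr : k % 2 ^ n < 2 ^ n := Nat.mod_lt _ (Nat.two_pow_pos n)
      obtain ⟨i1, i2, i3, i4⟩ := ih (k % 2 ^ n) hr
      have hdec : pvBitsBE (n + 1) k = ((k / 2 ^ n : Nat) : Int) :: pvBitsBE n (k % 2 ^ n) := rfl
      rw [hdec, List.sum_cons]
      have hdlt : k / 2 ^ n < 2 := by
        rw [Nat.div_lt_iff_lt_mul (Nat.two_pow_pos n)]
        calc k < 2 ^ (n + 1) := hk
          _ = 2 * 2 ^ n := by ring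
      have hsplit : 2 ^ n * (k / 2 ^ n) + k % 2 ^ n = k := Nat.div_add_mod k (2 ^ n)
      have h2 : (2 : Nat) ^ (n + 1) = 2 ^ n + 2 ^ n := by ring
      rw [h2] at hk ⊢
      have hpos : 0 < 2 ^ n := Nat.two_pow_pos n
      obtain ⟨d, hd⟩ : ∃ d, k / 2 ^ n = d := ⟨_, rfl⟩
      obtain ⟨r, hrr⟩ : ∃ r, k % 2 ^ n = r := ⟨_, rfl⟩
      rw [hd] at hdlt; rw [hd, hrr] at hsplit ⊢; rw [hrr] at hr i1 i2 i3 i4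
      rcases (by omega : d = 0 ∨ d = 1) with h | h <;> subst h <;> omega

lemma pvRange_filter (m : Nat) :
    (List.range m).filter (fun k => decide (k ≠ 0) && decide (k < m - 1)) =
      List.range' 1 (m - 2) := by
  match m with
  | 0 => rfl
  | 1 => rfl
  | m + 2 =>
      have h1 : List.range (m + 2) = 0 :: (List.range' 1 m ++ [1 + m]) := by
        rw [List.range_eq_range', show m + 2 = (m + 1) + 1 from rfl, List.range'_succ,
          List.range'_concat]
        simp
      rw [h1]
      simp only [List.filter_cons, List.filter_append]
      have hmid : (List.range' 1 m).filter (fun k => decide (k ≠ 0) && decide (k < m + 2 - 1)) =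
          List.range' 1 m := by
        apply List.filter_eq_self.mpr
        intro a ha
        have := List.mem_range'_1.mp ha
        simp only [Bool.and_eq_true, decide_eq_true_eq]
        omega
      rw [hmid]
      simp

lemma pvFold_bits (l : List Nat) : ∀ (c : Int) (acc : List Int),
    (l.foldl (fun (s : Int × List Int) _ =>
      (PySem.Int.floordiv s.1 2, s.2 ++ [PySem.Int.mod s.1 2])) (c, acc)).2
      = acc ++ pvBitsLE l.length c := by
  induction l with
  | nil => intro c acc; simp [pvBitsLE]
  | cons x xs ih =>
      intro c acc
      simp only [List.foldl_cons, List.length_cons]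
      rw [ih]
      simp [pvBitsLE]

lemma pvPer_len (n : Nat) :
    (pvProd01 n).filter (fun item => decide (item.sum ≠ 0 ∧ item.sum < (n : Int))) =
      (PySem.List.pyRange 1 ((2 : Int) ^ n - 1) 1).map (fun code =>
        ((List.range n).foldl
          (fun (s : Int × List Int) _ =>
            (PySem.Int.floordiv s.1 2, s.2 ++ [PySem.Int.mod s.1 2]))
          (code, [])).2.reverse) := by
  rw [pvProd01_eq, List.filter_map]
  have hfil : (List.range (2 ^ n)).filter
      ((fun item => decide (item.sum ≠ 0 ∧ item.sum < (n : Int))) ∘ pvBitsBE n) =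
      List.range' 1 (2 ^ n - 2) := by
    rw [← pvRange_filter (2 ^ n)]
    apply List.filter_congr
    intro k hk
    have hk' : k < 2 ^ n := List.mem_range.mp hk
    obtain ⟨i1, i2, _, _⟩ := pvSum_bitsBE n k hk'
    simp only [Function.comp_apply]
    have hiff : ((pvBitsBE n k).sum ≠ 0 ∧ (pvBitsBE n k).sum < (n : Int)) ↔
        (k ≠ 0 ∧ k < 2 ^ n - 1) := by rw [ne_eq, i1, i2]
    have hb : decide ((pvBitsBE n k).sum ≠ 0 ∧ (pvBitsBE n k).sum < (n : Int)) =
        decide (k ≠ 0 ∧ k < 2 ^ n - 1) := decide_eq_decide.mpr hiff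
    rw [hb]
    simp
  rw [hfil]
  have hcast2 : ((2 : Int) ^ n) = ((2 ^ n : Nat) : Int) := by push_cast; ring
  have ht : (((2 : Int) ^ n - 1) - 1).toNat = 2 ^ n - 2 := by
    rw [hcast2]
    have := Nat.two_pow_pos n
    omega
  rw [PySem.List.pyRange_one, ht, List.map_map, List.range'_eq_map_range, List.map_map]
  apply List.map_congr_left
  intro k hk
  have hk' : k < 2 ^ n - 2 := List.mem_range.mp hk
  have hb : 1 + k < 2 ^ n := by omega
  show pvBitsBE n (1 + k) = _
  simp only [Function.comp_apply]
  have hcast : (1 : Int) + (k : Int) = ((1 + k : Nat) : Int) := by push_cast; ring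
  rw [hcast, pvFold_bits (List.range n) _ []]
  simp only [List.length_range, List.nil_append]
  rw [pvBitsLE_eq n (1 + k) hb, List.reverse_reverse]

lemma pvOuter (l : List (String × List Int)) :
    ∀ acc : PySem.Dict String (List (List Int)),
      l.foldl (fun acc p =>
        acc.insert p.1 ((pvProd01 p.2.length).filter
          (fun item => decide (item.sum ≠ 0 ∧ item.sum < (p.2.length : Int))))) acc =
      l.foldl (fun acc p =>
        acc.insert p.1 ((PySem.List.pyRange 1 ((2 : Int) ^ p.2.length - 1) 1).map (fun code =>
          ((List.range p.2.length).foldl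
            (fun (s : Int × List Int) _ =>
              (PySem.Int.floordiv s.1 2, s.2 ++ [PySem.Int.mod s.1 2]))
            (code, [])).2.reverse))) acc := by
  induction l with
  | nil => intro acc; rfl
  | cons p rest ih =>
      intro acc
      simp only [List.foldl_cons]
      rw [pvPer_len p.2.length]
      exact ih _

-- ===== VERDICT (by name: the statement is the Claim_ definition above) =====
theorem state_generator_spec : Claim_equal_state_generator := by
  intro ps _
  unfold Spec_state_generator state_generator state_generator_alt
  congr 1
  dsimp only
  exact pvOuter (PySem.Dict.ofList ps).items PySem.Dict.empty
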